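-- pv_equiv track=rewrite | github.com/sohyeon-jeon/Dev-Dictionary | Algorithm/Programmers/연속된 부분 수열의 합.py | solution
-- ===== SOURCE A (Python) =====
-- def solution(sequence, k):
--     left = right = 0
--     answer = [0, len(sequence)]
--     sum = sequence[0]
--
--     while True:
--         if sum < k:
--             right += 1
--             if right == len(sequence):
--                 break
--             sum += sequence[right]
--         else:
--             if sum == k:
--                 if right - left < answer[1] - answer[0]:
--                     answer = [left, right]
--
--             sum -= sequence[left]
--             left += 1
--     return answer
-- ===== SOURCE B (Python) =====
-- def solution(sequence, k):
--     n = len(sequence)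
--     Q = []   # Q[j] = sequence[0] + ... + sequence[j]
--     s = 0
--     for x in sequence:
--         s += x
--         Q.append(s)
--
--     def build(lo, hi):   # max segment tree over Q[lo:hi)
--         if hi - lo == 1:
--             return (lo, hi, Q[lo], None, None)
--         mid = (lo + hi) // 2
--         lt = build(lo, mid)
--         rt = build(mid, hi)
--         return (lo, hi, max(lt[2], rt[2]), lt, rt)
--
--     def first_at_least(node, start, t):
--         # smallest j >= start in the node's range with Q[j] >= t, else None
--         lo, hi, mx, lt, rt = node
--         if hi <= start or mx < t:
--             return None
--         if hi - lo == 1: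
--             return lo
--         res = first_at_least(lt, start, t)
--         if res is not None:
--             return res
--         return first_at_least(rt, start, t)
--
--     best = [0, n]
--     if n == 0:
--         return best
--     tree = build(0, n)
--     base = 0   # prefix sum before index l
--     r = 0
--     for l in range(n):
--         j = first_at_least(tree, r, base + k)
--         if j is None:
--             return best
--         r = j
--         if Q[j] == base + k and j - l < best[1] - best[0]:
--             best = [l, j]
--         base += sequence[l]
--     return best
-- ===== Notes on version B (the rewrite author's own statement) =====
-- stated objective: alternative
-- what changed: Replaces the stateful two-pointer sliding window by prefix sums plus a max segment tree: for each left end the matching right end is located by a first-index-at-least descent query instead of incremental pointer movement.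
import Mathlib
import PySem

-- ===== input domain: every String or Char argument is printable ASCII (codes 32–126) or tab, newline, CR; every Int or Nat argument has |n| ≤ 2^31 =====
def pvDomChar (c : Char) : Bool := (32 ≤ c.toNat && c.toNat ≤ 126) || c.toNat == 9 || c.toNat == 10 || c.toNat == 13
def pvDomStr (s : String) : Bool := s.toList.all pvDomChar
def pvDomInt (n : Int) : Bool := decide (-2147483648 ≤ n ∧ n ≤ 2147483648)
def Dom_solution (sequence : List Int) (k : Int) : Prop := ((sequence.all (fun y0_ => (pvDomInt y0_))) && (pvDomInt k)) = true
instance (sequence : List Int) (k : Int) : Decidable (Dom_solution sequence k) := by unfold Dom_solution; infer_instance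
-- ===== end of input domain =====

-- B replaces A's stateful two-pointer sliding window by prefix sums plus a max segment tree
-- (first-at-least descent per left end); proved equal to A on exactly the inputs A returns on.


-- ===== PORT A =====
-- the while-loop of A; fuel is an upper bound on the remaining iterations (each step increments
-- left or right; inside Pre_ both stay < the length, so the initial budget 2*len+2 is never
-- exhausted); `none` from pyGet? is Python's IndexError (outside Pre_)
def solutionLoopA (sequence : List Int) (k : Int) :
    Nat → Nat → Nat → List Int → Int → List Int
  | 0, _, _, answer, _ => answer
  | fuel + 1, left, right, answer, sum =>
    if sum < k then
      if right + 1 = sequence.length then answer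
      else
        match PySem.List.pyGet? sequence ((right + 1 : Nat) : Int) with
        | none => answer
        | some v => solutionLoopA sequence k fuel left (right + 1) answer (sum + v)
    else
      let answer' :=
        if sum = k then
          if (right : Int) - (left : Int) <
              PySem.List.pyGetD answer 1 0 - PySem.List.pyGetD answer 0 0 then
            [(left : Int), (right : Int)]
          else answer
        else answer
      match PySem.List.pyGet? sequence ((left : Nat) : Int) with
      | none => answer'   -- Python raises IndexError here (outside Pre_)
      | some v => solutionLoopA sequence k fuel (left + 1) right answer' (sum - v)

def solution (sequence : List Int) (k : Int) : List Int :=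
  match PySem.List.pyGet? sequence 0 with
  | none => [0, (sequence.length : Int)]   -- Python raises IndexError on the empty list (outside Pre_)
  | some s =>
      solutionLoopA sequence k (2 * sequence.length + 2) 0 0 [0, (sequence.length : Int)] s

-- ===== PORT B =====
-- a node of Source B's tuple tree (lo, hi, mx, left, right); a leaf stores (lo, mx) with hi = lo+1
inductive SegTree where
  | leaf : Nat → Int → SegTree
  | node : Nat → Nat → Int → SegTree → SegTree → SegTree
deriving Repr, DecidableEq

def SegTree.mxv : SegTree → Int
  | .leaf _ m => m
  | .node _ _ m _ _ => m

-- Source B's build(lo, hi); Python only ever calls it with lo < hi, the `hi ≤ lo + 1` guard (instead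
-- of Python's `hi - lo == 1`) merely makes the same computation total/terminating
def buildSeg (Q : List Int) (lo hi : Nat) : SegTree :=
  if hi ≤ lo + 1 then .leaf lo (PySem.List.pyGetD Q (lo : Int) 0)
  else
    let mid := (lo + hi) / 2
    let lt := buildSeg Q lo mid
    let rt := buildSeg Q mid hi
    .node lo hi (max lt.mxv rt.mxv) lt rt
  termination_by hi - lo
  decreasing_by all_goals omega

-- Source B's first_at_least(node, start, t)
def queryFAL : SegTree → Nat → Int → Option Nat
  | .leaf lo m, start, t =>
      if lo + 1 ≤ start ∨ m < t then none else some lo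
  | .node _ hi m lt rt, start, t =>
      if hi ≤ start ∨ m < t then none
      else
        match queryFAL lt start t with
        | some res => some res
        | none => queryFAL rt start t

-- Source B's main for-loop over l with state (base, r, best); `none` from the query is the early return
def altLoopB (sequence : List Int) (k : Int) (Q : List Int) (tree : SegTree)
    (l : Nat) (base : Int) (r : Nat) (best : List Int) : List Int :=
  if _h : l < sequence.length then
    match queryFAL tree r (base + k) with
    | none => best
    | some j =>
      let best' :=
        if PySem.List.pyGetD Q (j : Int) 0 = base + k ∧
            (j : Int) - (l : Int) <
              PySem.List.pyGetD best 1 0 - PySem.List.pyGetD best 0 0 then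
          [(l : Int), (j : Int)]
        else best
      altLoopB sequence k Q tree (l + 1) (base + PySem.List.pyGetD sequence (l : Int) 0) j best'
  else best
  termination_by sequence.length - l
  decreasing_by omega

def solution_alt (sequence : List Int) (k : Int) : List Int :=
  let Q := (sequence.foldl (fun p x => (p.1 ++ [p.2 + x], p.2 + x)) (([] : List Int), (0 : Int))).1
  if sequence.length = 0 then [0, (sequence.length : Int)]
  else
    altLoopB sequence k Q (buildSeg Q 0 sequence.length) 0 0 0 [0, (sequence.length : Int)]

-- ===== PRECONDITION & SPEC =====

-- prefix sum of the first i elements (P[i]); used by Pre_ and the proofs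
def pfx (seq : List Int) (i : Nat) : Int := (seq.take i).sum

-- Pre_ excludes exactly the inputs on which A raises IndexError: the empty list, and the k ≤ 0
-- inputs on which the two-pointer walk drives `left` past the end, which happens precisely when
-- every "row" has a stop, i.e. unless some prefix sum P[i] satisfies P[j+1] < P[i] + k for all j;
-- A returns on every input Pre_ admits, and Pre_ excludes no input A returns on.
def Pre_solution (sequence : List Int) (k : Int) : Prop :=
  sequence ≠ [] ∧
    (0 < k ∨ ∃ i, i < sequence.length ∧ ∀ j, j < sequence.length →
      pfx sequence (j + 1) < pfx sequence i + k)
instance (sequence : List Int) (k : Int) : Decidable (Pre_solution sequence k) := by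
  unfold Pre_solution; infer_instance

def pvWitness_solution : List Int × Int := ([1, 2, 3], 3)

def Spec_solution (sequence : List Int) (k : Int) (out : List Int) : Prop := out = solution_alt sequence k
instance (sequence : List Int) (k : Int) (out : List Int) : Decidable (Spec_solution sequence k out) := by unfold Spec_solution; infer_instance

-- ===== CLAIM (what is proved, stated in full; the proofs are below) =====
def Claim_equal_solution : Prop := ∀ (sequence : List Int) (k : Int), Dom_solution sequence k → Pre_solution sequence k → Spec_solution sequence k (solution sequence k)


-- ===== LEMMAS AND PROOFS =====

-- Source B's Q as a list
def QL (seq : List Int) : List Int :=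
  (List.range seq.length).map (fun j => pfx seq (j + 1))

-- the value both programs compute per left end: the first j ≥ start with Q[j] ≥ t
def rFirst (seq : List Int) (start : Nat) (t : Int) : Option Nat :=
  (List.range' start (seq.length - start)).find?
    (fun j => decide (t ≤ PySem.List.pyGetD (QL seq) (j : Int) 0))

-- the common left-to-right sweep both programs perform
def lLoop (seq : List Int) (k : Int) (l r : Nat) (best : List Int) : List Int :=
  if l < seq.length then
    match rFirst seq r (pfx seq l + k) with
    | none => best
    | some j =>
        lLoop seq k (l + 1) j
          (if pfx seq (j + 1) = pfx seq l + k ∧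
              (j : Int) - (l : Int) <
                PySem.List.pyGetD best 1 0 - PySem.List.pyGetD best 0 0 then
            [(l : Int), (j : Int)]
          else best)
  else best
  termination_by seq.length - l
  decreasing_by omega

theorem pfx_succ (seq : List Int) (i : Nat) (h : i < seq.length) :
    pfx seq (i + 1) = pfx seq i + seq[i] := by
  unfold pfx
  rw [List.take_add_one, List.sum_append, List.getElem?_eq_getElem h]
  simp

theorem QL_get (seq : List Int) {j : Nat} (h : j < seq.length) :
    PySem.List.pyGetD (QL seq) (j : Int) 0 = pfx seq (j + 1) := by
  rw [PySem.List.pyGetD_natCast, QL, List.getD_eq_getElem?_getD]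
  simp [List.getElem?_map, List.getElem?_range h]

theorem rFirst_of_ge (seq : List Int) {start : Nat} (h : seq.length ≤ start) (t : Int) :
    rFirst seq start t = none := by
  unfold rFirst
  rw [Nat.sub_eq_zero_of_le h]
  rfl

theorem rFirst_skip (seq : List Int) {r : Nat} (hr : r < seq.length) {t : Int}
    (hfail : ¬ t ≤ pfx seq (r + 1)) :
    rFirst seq r t = rFirst seq (r + 1) t := by
  unfold rFirst
  rw [show seq.length - r = (seq.length - (r + 1)) + 1 by omega, List.range'_succ]
  rw [List.find?_cons_of_neg]
  simp [QL_get seq hr, hfail]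

theorem rFirst_hit (seq : List Int) {r : Nat} (hr : r < seq.length) {t : Int}
    (hok : t ≤ pfx seq (r + 1)) :
    rFirst seq r t = some r := by
  unfold rFirst
  rw [show seq.length - r = (seq.length - (r + 1)) + 1 by omega, List.range'_succ]
  rw [List.find?_cons_of_pos]
  simp [QL_get seq hr, hok]

theorem lLoop_skip (seq : List Int) (k : Int) {l r : Nat}
    (hr : r < seq.length) (hfail : ¬ pfx seq l + k ≤ pfx seq (r + 1)) (best : List Int) :
    lLoop seq k l r best = lLoop seq k l (r + 1) best := by
  rw [lLoop, lLoop]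
  rw [rFirst_skip seq hr hfail]

-- A's while-loop is the left-to-right sweep; the disjunctive invariant covers both regimes:
-- for 0 < k the pointers satisfy left ≤ right + 1, for k ≤ 0 Pre_ provides a row i* with no
-- stop, the walk never passes it, so `left` never reaches the length (no IndexError)
theorem loopA_eq_lLoop (seq : List Int) (k : Int) :
    ∀ (fuel l r : Nat) (ans : List Int) (sum : Int),
      r < seq.length →
      sum = pfx seq (r + 1) - pfx seq l →
      ((0 < k ∧ l ≤ r + 1) ∨
        (∃ i, l ≤ i ∧ i < seq.length ∧ ∀ j, j < seq.length →
          pfx seq (j + 1) < pfx seq i + k)) →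
      (seq.length - l) + (seq.length - r) + 1 ≤ fuel →
      solutionLoopA seq k fuel l r ans sum = lLoop seq k l r ans := by
  intro fuel
  induction fuel with
  | zero => intro l r ans sum hr hsum hinv hfuel; omega
  | succ fuel ih =>
      intro l r ans sum hr hsum hinv hfuel
      by_cases hlt : sum < k
      · by_cases hbr : r + 1 = seq.length
        · -- break: the sweep finds nothing at l (if l < len) and returns ans
          simp only [solutionLoopA, if_pos hlt, if_pos hbr]
          by_cases hln : l < seq.length
          · rw [lLoop_skip seq k hr (by omega) ans, lLoop]
            rw [rFirst_of_ge seq (by omega)]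
            simp [hln]
          · rw [lLoop]
            simp [hln]
        · have hrn : r + 1 < seq.length := by omega
          have hget : PySem.List.pyGet? seq ((r + 1 : Nat) : Int) = some seq[r + 1] := by
            rw [PySem.List.pyGet?_natCast]
            exact List.getElem?_eq_getElem hrn
          simp only [solutionLoopA, if_pos hlt, if_neg hbr, hget]
          rw [ih l (r + 1) ans (sum + seq[r + 1]) hrn
            (by rw [pfx_succ seq (r + 1) hrn]; omega)
            (hinv.imp (fun h => ⟨h.1, by omega⟩) id) (by omega)]
          exact (lLoop_skip seq k hr (by omega) ans).symm
      · -- window found at (l, r): the sweep records it and moves l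
        rw [not_lt] at hlt
        have hstate : l < seq.length ∧
            ((0 < k ∧ l + 1 ≤ r + 1) ∨
              (∃ i, l + 1 ≤ i ∧ i < seq.length ∧ ∀ j, j < seq.length →
                pfx seq (j + 1) < pfx seq i + k)) := by
          rcases hinv with ⟨hk, hlr⟩ | ⟨i, hli, hin, hrow⟩
          · have hlr' : l ≤ r := by
              rcases Nat.lt_or_ge l (r + 1) with h | h
              · omega
              · have hl_eq : l = r + 1 := by omega
                subst hl_eq
                simp at hsum
                omega
            exact ⟨by omega, Or.inl ⟨hk, by omega⟩⟩
          · have hlti : l < i := by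
              rcases Nat.lt_or_ge l i with h | h
              · exact h
              · have hl_eq : l = i := by omega
                subst hl_eq
                have := hrow r hr
                omega
            exact ⟨by omega, Or.inr ⟨i, by omega, hin, hrow⟩⟩
        obtain ⟨hln, hinv'⟩ := hstate
        have hget : PySem.List.pyGet? seq ((l : Nat) : Int) = some seq[l] := by
          rw [PySem.List.pyGet?_natCast]
          exact List.getElem?_eq_getElem hln
        have hhit : rFirst seq r (pfx seq l + k) = some r :=
          rFirst_hit seq hr (by omega)
        have hstep :
            (if sum = k then
              if (r : Int) - (l : Int) <
                  PySem.List.pyGetD ans 1 0 - PySem.List.pyGetD ans 0 0 then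
                [(l : Int), (r : Int)]
              else ans
            else ans)
            = (if pfx seq (r + 1) = pfx seq l + k ∧
                  (r : Int) - (l : Int) <
                    PySem.List.pyGetD ans 1 0 - PySem.List.pyGetD ans 0 0 then
                [(l : Int), (r : Int)]
              else ans) := by
          by_cases hek : sum = k
          · have : pfx seq (r + 1) = pfx seq l + k := by omega
            simp only [if_pos hek, this, true_and]
          · have : ¬ pfx seq (r + 1) = pfx seq l + k := by omega
            simp [hek, this]
        simp only [solutionLoopA, if_neg (not_lt.mpr hlt), hget, hstep]
        rw [ih (l + 1) r _ (sum - seq[l]) hr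
          (by rw [pfx_succ seq l hln]; omega) hinv' (by omega)]
        conv_rhs => rw [lLoop]
        simp only [if_pos hln, hhit]

theorem solution_eq_lLoop (seq : List Int) (k : Int) (hne : seq ≠ [])
    (hpre : 0 < k ∨ ∃ i, i < seq.length ∧ ∀ j, j < seq.length →
      pfx seq (j + 1) < pfx seq i + k) :
    solution seq k = lLoop seq k 0 0 [0, (seq.length : Int)] := by
  have hn : 0 < seq.length := List.length_pos_iff.mpr hne
  have hget : PySem.List.pyGet? seq 0 = some seq[0] := by
    rw [show (0 : Int) = ((0 : Nat) : Int) from rfl, PySem.List.pyGet?_natCast]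
    exact List.getElem?_eq_getElem hn
  have h0 : seq[0] = pfx seq (0 + 1) - pfx seq 0 := by
    rw [pfx_succ seq 0 hn]; simp [pfx]
  simp only [solution, hget]
  exact loopA_eq_lLoop seq k (2 * seq.length + 2) 0 0 _ seq[0] hn h0
    (hpre.imp (fun hk => ⟨hk, by omega⟩) (fun ⟨i, hi, hrow⟩ => ⟨i, Nat.zero_le _, hi, hrow⟩))
    (by omega)

-- ===== B-side =====

-- the folded Q-building loop of Source B produces exactly the prefix sums
theorem Qbuild (xs : List Int) :
    ∀ (acc : List Int) (s : Int),
      (xs.foldl (fun p x => (p.1 ++ [p.2 + x], p.2 + x)) (acc, s)).1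
        = acc ++ (List.range xs.length).map (fun j => s + pfx xs (j + 1)) := by
  induction xs with
  | nil => intro acc s; simp
  | cons x xs ih =>
      intro acc s
      simp only [List.foldl_cons]
      rw [ih (acc ++ [s + x]) (s + x)]
      conv_rhs => rw [show (x :: xs).length = xs.length + 1 from rfl, List.range_succ_eq_map]
      simp only [List.map_cons, List.map_map, List.append_assoc, List.singleton_append]
      refine congrArg _ (List.cons_eq_cons.mpr ⟨?_, ?_⟩)
      · unfold pfx; simp
      · apply List.map_congr_left
        intro j _
        simp only [Function.comp_apply, Nat.succ_eq_add_one, pfx, List.take_succ_cons,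
          List.sum_cons]
        ring

-- the shape invariant of Source B's tree: it covers [lo, hi) of Q with correct maxima
def goodTree (Q : List Int) : SegTree → Nat → Nat → Prop
  | .leaf l m, lo, hi => l = lo ∧ hi = lo + 1 ∧ m = PySem.List.pyGetD Q (lo : Int) 0
  | .node _ h m lt rt, lo, hi =>
      h = hi ∧ lo + 1 < hi ∧
      goodTree Q lt lo ((lo + hi) / 2) ∧ goodTree Q rt ((lo + hi) / 2) hi ∧
      m = max lt.mxv rt.mxv

theorem build_good (Q : List Int) :
    ∀ (d lo hi : Nat), lo < hi → hi - lo ≤ d → goodTree Q (buildSeg Q lo hi) lo hi := by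
  intro d
  induction d with
  | zero => intro lo hi h1 h2; omega
  | succ d ih =>
      intro lo hi h1 h2
      rw [buildSeg]
      by_cases hleaf : hi ≤ lo + 1
      · rw [if_pos hleaf]
        exact ⟨rfl, by omega, rfl⟩
      · rw [if_neg hleaf]
        refine ⟨rfl, by omega, ?_, ?_, rfl⟩
        · exact ih lo ((lo + hi) / 2) (by omega) (by omega)
        · exact ih ((lo + hi) / 2) hi (by omega) (by omega)

theorem mx_ub (Q : List Int) :
    ∀ (t : SegTree) (lo hi : Nat), goodTree Q t lo hi →
      ∀ j, lo ≤ j → j < hi → PySem.List.pyGetD Q (j : Int) 0 ≤ t.mxv := by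
  intro t
  induction t with
  | leaf l m =>
      intro lo hi hg j h1 h2
      obtain ⟨he, hhi, hm⟩ := hg
      have : j = lo := by omega
      subst this
      simp [SegTree.mxv, hm]
  | node l h m lt rt ihl ihr =>
      intro lo hi hg j h1 h2
      obtain ⟨hh, hsz, hgl, hgr, hm⟩ := hg
      have hmx : (SegTree.node l h m lt rt).mxv = max lt.mxv rt.mxv := hm
      rw [hmx]
      rcases Nat.lt_or_ge j ((lo + hi) / 2) with hj | hj
      · exact le_trans (ihl lo ((lo + hi) / 2) hgl j h1 hj) (le_max_left _ _)
      · exact le_trans (ihr ((lo + hi) / 2) hi hgr j hj (by omega)) (le_max_right _ _)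

-- the descent query returns the first index ≥ start in the covered range satisfying the test
theorem query_spec (Q : List Int) :
    ∀ (t : SegTree) (lo hi : Nat), goodTree Q t lo hi → ∀ (start : Nat) (thr : Int),
      queryFAL t start thr
        = (List.range' lo (hi - lo)).find?
            (fun j => decide (start ≤ j) && decide (thr ≤ PySem.List.pyGetD Q (j : Int) 0)) := by
  intro t
  induction t with
  | leaf l m =>
      intro lo hi hg start thr
      obtain ⟨he, hhi, hm⟩ := hg
      rw [hhi, show lo + 1 - lo = 1 by omega, List.range'_one]
      simp only [queryFAL, he, hm]
      by_cases h1 : lo + 1 ≤ start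
      · rw [if_pos (Or.inl h1), List.find?_cons_of_neg (by simp only [Bool.and_eq_true, decide_eq_true_eq, not_and, not_le]; intro h; omega)]
        rfl
      · by_cases h2 : PySem.List.pyGetD Q (lo : Int) 0 < thr
        · rw [if_pos (Or.inr h2), List.find?_cons_of_neg (by simp only [Bool.and_eq_true, decide_eq_true_eq, not_and, not_le]; intro h; omega)]
          rfl
        · rw [if_neg (by tauto), List.find?_cons_of_pos (by simp only [Bool.and_eq_true, decide_eq_true_eq]; exact ⟨by omega, by omega⟩)]
  | node l h m lt rt ihl ihr =>
      intro lo hi hg start thr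
      obtain ⟨hh, hsz, hgl, hgr, hm⟩ := hg
      simp only [queryFAL, hh, hm]
      rw [show List.range' lo (hi - lo)
          = List.range' lo ((lo + hi) / 2 - lo) ++ List.range' ((lo + hi) / 2) (hi - (lo + hi) / 2)
        from by
          have hsp := List.range'_append_1 (s := lo) (m := (lo + hi) / 2 - lo)
            (n := hi - (lo + hi) / 2)
          rw [show lo + ((lo + hi) / 2 - lo) = (lo + hi) / 2 by omega,
            show (lo + hi) / 2 - lo + (hi - (lo + hi) / 2) = hi - lo by omega] at hsp
          exact hsp.symm]
      rw [List.find?_append]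
      by_cases hp : hi ≤ start ∨ max lt.mxv rt.mxv < thr
      · rw [if_pos hp]
        have hnone : ∀ (lo' hi' : Nat) (t' : SegTree), goodTree Q t' lo' hi' → hi' ≤ hi →
            t'.mxv ≤ max lt.mxv rt.mxv →
            (List.range' lo' (hi' - lo')).find?
              (fun j => decide (start ≤ j) && decide (thr ≤ PySem.List.pyGetD Q (j : Int) 0))
              = none := by
          intro lo' hi' t' hg' hle hmx
          apply List.find?_eq_none.mpr
          intro j hj
          have hj1 : lo' ≤ j ∧ j < lo' + (hi' - lo') := List.mem_range'_1.mp hj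
          simp only [Bool.and_eq_true, decide_eq_true_eq, not_and, not_le]
          intro hs
          rcases hp with hp | hp
          · omega
          · have := mx_ub Q t' lo' hi' hg' j (by omega) (by omega)
            omega
        rw [hnone lo ((lo + hi) / 2) lt hgl (by omega) (le_max_left _ _),
          hnone ((lo + hi) / 2) hi rt hgr (by omega) (le_max_right _ _)]
        rfl
      · rw [if_neg hp]
        rw [ihl lo ((lo + hi) / 2) hgl start thr, ihr ((lo + hi) / 2) hi hgr start thr]
        cases (List.range' lo ((lo + hi) / 2 - lo)).find?
            (fun j => decide (start ≤ j) && decide (thr ≤ PySem.List.pyGetD Q (j : Int) 0)) with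
        | none => simp
        | some v => simp

theorem QL_from_fold (seq : List Int) :
    (seq.foldl (fun p x => (p.1 ++ [p.2 + x], p.2 + x)) (([] : List Int), (0 : Int))).1
      = QL seq := by
  rw [Qbuild seq [] 0]
  simp only [List.nil_append, QL]
  apply List.map_congr_left
  intro j _
  exact zero_add _

theorem find?_and_true {l : List Nat} {q p : Nat → Bool} (h : ∀ j ∈ l, q j = true) :
    l.find? (fun j => q j && p j) = l.find? p := by
  induction l with
  | nil => rfl
  | cons a l ih =>
      have ha := h a (by simp)
      by_cases hp : p a
      · rw [List.find?_cons_of_pos (p := fun j => q j && p j) (by simp [ha, hp]),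
          List.find?_cons_of_pos hp]
      · rw [List.find?_cons_of_neg (p := fun j => q j && p j) (by simp [ha, hp]),
          List.find?_cons_of_neg (by simp [hp])]
        exact ih (fun j hj => h j (by simp [hj]))

theorem find?_range'_start (n start : Nat) (p : Nat → Bool) :
    (List.range' 0 n).find? (fun j => decide (start ≤ j) && p j)
      = (List.range' start (n - start)).find? p := by
  rcases Nat.le_total start n with h | h
  · rw [show List.range' 0 n = List.range' 0 start ++ List.range' start (n - start) from by
        have hsp := List.range'_append_1 (s := 0) (m := start) (n := n - start)
        rw [Nat.zero_add, show start + (n - start) = n by omega] at hsp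
        exact hsp.symm]
    rw [List.find?_append]
    have h1 : (List.range' 0 start).find? (fun j => decide (start ≤ j) && p j) = none := by
      apply List.find?_eq_none.mpr
      intro j hj
      have := List.mem_range'_1.mp hj
      simp only [Bool.and_eq_true, decide_eq_true_eq, not_and]
      intro hs
      exact absurd hs (by omega)
    rw [h1]
    rw [find?_and_true (fun j hj => by
      have := List.mem_range'_1.mp hj
      simp only [decide_eq_true_eq]
      omega)]
    exact Option.none_or
  · rw [show n - start = 0 by omega]
    apply List.find?_eq_none.mpr
    intro j hj
    have := List.mem_range'_1.mp hj
    simp only [Bool.and_eq_true, decide_eq_true_eq, not_and]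
    intro hs
    exact absurd hs (by omega)

theorem rFirst_mem {seq : List Int} {start j : Nat} {t : Int}
    (h : rFirst seq start t = some j) : start ≤ j ∧ j < seq.length := by
  have h1 := List.mem_of_find?_eq_some h
  have h2 := List.mem_range'_1.mp h1
  omega

-- Source B's main loop performs the common left-to-right sweep
theorem altLoop_eq (seq : List Int) (k : Int) (tree : SegTree)
    (hg : goodTree (QL seq) tree 0 seq.length) :
    ∀ (d l : Nat) (base : Int) (r : Nat) (best : List Int),
      seq.length - l ≤ d → base = pfx seq l →
      altLoopB seq k (QL seq) tree l base r best = lLoop seq k l r best := by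
  intro d
  induction d with
  | zero =>
      intro l base r best hd hb
      rw [altLoopB, lLoop]
      have hnl : ¬ l < seq.length := by omega
      simp [hnl]
  | succ d ih =>
      intro l base r best hd hb
      by_cases hl : l < seq.length
      · have hq : queryFAL tree r (base + k) = rFirst seq r (pfx seq l + k) := by
          rw [query_spec (QL seq) tree 0 seq.length hg r (base + k), hb, Nat.sub_zero]
          exact find?_range'_start seq.length r _
        rw [altLoopB, lLoop, hq]
        cases hr : rFirst seq r (pfx seq l + k) with
        | none => simp [hl]
        | some j =>
            have hjm := rFirst_mem hr
            simp only [dif_pos hl, if_pos hl]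
            rw [QL_get seq hjm.2, hb]
            have hbase : pfx seq l + PySem.List.pyGetD seq ((l : Nat) : Int) 0
                = pfx seq (l + 1) := by
              rw [PySem.List.pyGetD_natCast, List.getD_eq_getElem?_getD,
                List.getElem?_eq_getElem hl]
              simp [pfx_succ seq l hl]
            rw [hbase]
            exact ih (l + 1) (pfx seq (l + 1)) j _ (by omega) rfl
      · rw [altLoopB, lLoop]
        simp [hl]

theorem alt_eq_lLoop (seq : List Int) (k : Int) (hne : seq ≠ []) :
    solution_alt seq k = lLoop seq k 0 0 [0, (seq.length : Int)] := by
  have hn : 0 < seq.length := List.length_pos_iff.mpr hne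
  simp only [solution_alt, QL_from_fold seq]
  rw [if_neg (by omega)]
  exact altLoop_eq seq k _ (build_good (QL seq) seq.length 0 seq.length hn (by omega))
    seq.length 0 0 0 _ (by omega) (by simp [pfx])

-- ===== VERDICT (by name: the statements are the Claim_ definitions above) =====
theorem solution_spec : Claim_equal_solution := by
  intro seq k _ hpre
  obtain ⟨hne, hd⟩ := hpre
  unfold Spec_solution
  rw [solution_eq_lLoop seq k hne hd, alt_eq_lLoop seq k hne]
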